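-- pv_equiv track=rewrite | github.com/avermap/zn-python-detection | Code/62Demonstrate.py | findComments
-- ===== SOURCE A (Python) =====
-- def findComments(sourcecode):
--   commentareas = []
--
--   inacomment = False
--   bigcomment = False
--   bigcomment2 = False
--   commentstart = -1
--   commentend = -1
--   bigcommentstart = -1
--   bigcommentend = -1
--   bigcomment2start = -1
--   bigcomment2end = -1
--
--
--   for pos in range(len(sourcecode)):
--     if sourcecode[pos] == "#":
--       if not inacomment:
--         commentstart = pos
--         inacomment = True
--
--     if sourcecode[pos] == "\n":
--       if inacomment:
--         commentend = pos
--         inacomment = False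
--
--     if commentstart >= 0 and commentend >= 0:
--       t = [commentstart, commentend]
--       commentareas.append(t)
--       commentstart = -1
--       commentend = -1
--
--  #   if sourcecode[pos] == "'":
--  #     if pos < len(sourcecode) + 2:
--  #       if sourcecode[pos+1] == "'" and sourcecode[pos+2] == "'":
--  #         if not bigcomment:
--  #           bigcomment = True
--  #           bigcommentstart = pos
--  #         else:
--  #           bigcomment = False
--  #           bigcommentend = pos+3
--  #   if bigcommentstart > 0 and bigcommentend > 0:
--  #     t = [bigcommentstart, bigcommentend]
--  #     commentareas.append(t)
--  #     bigcommentstart = -1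
--  #     bigcommentend = -1#
-- #
-- #    if sourcecode[pos] == '"':
-- #      if pos < len(sourcecode) + 2:
-- #        if sourcecode[pos+1] == '"' and sourcecode[pos+2] == '"':
-- #          if not bigcomment2:
-- #            bigcomment2 = True
-- #            bigcomment2start = pos
-- #          else:
-- #            bigcomment2 = False
-- #            bigcomment2end = pos+3
-- #    if bigcomment2start > 0 and bigcomment2end > 0:
-- #      t = [bigcomment2start, bigcomment2end]
-- #      commentareas.append(t)
-- #      bigcomment2start = -1
-- #      bigcomment2end = -1
--
--   return commentareas
-- ===== SOURCE B (Python) =====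
-- def findComments(sourcecode):
--     commentareas = []
--     offset = 0
--     for line in sourcecode.split('\n')[:-1]:
--         h = line.find('#')
--         if h != -1:
--             commentareas.append([offset + h, offset + len(line)])
--         offset += len(line) + 1
--     return commentareas
-- ===== Notes on version B (the rewrite author's own statement) =====
-- stated objective: faster
-- what changed: Replaced A's character-by-character state machine (inacomment/commentstart/commentend flags) with a per-line pass: split the source on newlines and for each terminated line record the span from its first hash character to its terminating newline, tracking a running offset.
import Mathlib
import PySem

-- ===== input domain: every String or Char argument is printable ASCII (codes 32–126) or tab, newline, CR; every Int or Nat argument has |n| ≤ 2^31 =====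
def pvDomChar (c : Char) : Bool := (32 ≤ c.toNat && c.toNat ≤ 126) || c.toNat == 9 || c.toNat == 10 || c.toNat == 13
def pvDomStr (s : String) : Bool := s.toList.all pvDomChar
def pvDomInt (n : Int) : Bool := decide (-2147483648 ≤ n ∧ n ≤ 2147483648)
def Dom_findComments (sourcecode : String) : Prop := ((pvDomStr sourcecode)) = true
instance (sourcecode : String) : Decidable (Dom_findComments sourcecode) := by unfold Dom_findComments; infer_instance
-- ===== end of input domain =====

-- B replaces A's character-by-character state machine by a per-line scan (split on '\n',
-- fold with a running offset), doing the scanning in C-speed str.split/str.find; a timing run measured B faster. Both are total; return values are equal.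

-- ===== PORT A =====
-- A's loop body: state (commentareas, inacomment, commentstart, commentend); the unused
-- bigcomment* variables of A are dead (all code using them is commented out) and are omitted.
def findCommentsStep (st : List (List Int) × Bool × Int × Int) (pc : Int × Char) :
    List (List Int) × Bool × Int × Int :=
  match st, pc with
  | (acc, ina, cstart, cend), (pos, c) =>
    let s1 : Bool × Int := if c = '#' then (if !ina then (true, pos) else (ina, cstart)) else (ina, cstart)
    let s2 : Bool × Int := if c = '\n' then (if s1.1 then (false, pos) else (s1.1, cend)) else (s1.1, cend)
    if 0 ≤ s1.2 ∧ 0 ≤ s2.2 then (acc ++ [[s1.2, s2.2]], s2.1, -1, -1)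
    else (acc, s2.1, s1.2, s2.2)

def findComments (sourcecode : String) : List (List Int) :=
  ((PySem.List.enumerate sourcecode.toList 0).foldl findCommentsStep ([], false, -1, -1)).1

-- ===== PORT B =====
-- B's loop body: state (commentareas, offset); one step per line of sourcecode.split('\n')[:-1].
def findCommentsAltStep (st : List (List Int) × Int) (line : List Char) : List (List Int) × Int :=
  let h := PySem.Chars.find line ['#']
  ((if h ≠ -1 then st.1 ++ [[st.2 + h, st.2 + (line.length : Int)]] else st.1),
   st.2 + (line.length : Int) + 1)

def findComments_alt (sourcecode : String) : List (List Int) :=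
  ((sourcecode.toList.splitOn '\n').dropLast.foldl findCommentsAltStep ([], 0)).1

-- ===== PRECONDITION & SPEC =====
def Spec_findComments (sourcecode : String) (out : List (List Int)) : Prop := out = findComments_alt sourcecode
instance (sourcecode : String) (out : List (List Int)) : Decidable (Spec_findComments sourcecode out) := by unfold Spec_findComments; infer_instance

-- ===== CLAIM (what is proved, stated in full; the proofs are below) =====
def Claim_equal_findComments : Prop := ∀ (sourcecode : String), Dom_findComments sourcecode → Spec_findComments sourcecode (findComments sourcecode)

-- ===== LEMMAS AND PROOFS =====

-- While inside a comment, and with no '\n' coming, A's state does not change.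
lemma foldA_in_comment (l : List Char) (h : '\n' ∉ l) (n : Int) (acc : List (List Int)) (s : Int) :
    (PySem.List.enumerate l n).foldl findCommentsStep (acc, true, s, -1) = (acc, true, s, -1) := by
  induction l generalizing n with
  | nil => simp [PySem.List.enumerate_nil]
  | cons c l ih =>
    simp only [List.mem_cons, not_or] at h
    rw [PySem.List.enumerate_cons, List.foldl_cons]
    have hstep : findCommentsStep (acc, true, s, -1) (n, c) = (acc, true, s, -1) := by
      simp [findCommentsStep]
      split_ifs <;> simp_all
    rw [hstep]; exact ih h.2 (n + 1)

-- Scanning one newline-free line from a clean state: the accumulator is unchanged and the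
-- state records the first '#' of the line (if any).
lemma foldA_line (l : List Char) (h : '\n' ∉ l) (n : Int) (acc : List (List Int)) :
    (PySem.List.enumerate l n).foldl findCommentsStep (acc, false, -1, -1) =
      match l.findIdx? (· == '#') with
      | none => (acc, false, -1, -1)
      | some f => (acc, true, n + (f : Int), -1) := by
  induction l generalizing n with
  | nil => simp [PySem.List.enumerate_nil]
  | cons c l ih =>
    simp only [List.mem_cons, not_or] at h
    rw [PySem.List.enumerate_cons, List.foldl_cons, List.findIdx?_cons]
    by_cases hc : c = '#'
    · have hstep : findCommentsStep (acc, false, -1, -1) (n, c) = (acc, true, n, -1) := by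
        simp [findCommentsStep, hc]
      rw [hstep, foldA_in_comment l h.2 (n + 1) acc n]
      simp [hc]
    · have hstep : findCommentsStep (acc, false, -1, -1) (n, c) = (acc, false, -1, -1) := by
        simp [findCommentsStep, hc]
      rw [hstep, ih h.2 (n + 1)]
      have hcb : (c == '#') = false := by simp [hc]
      simp only [hcb, Bool.false_eq_true, if_false]
      cases l.findIdx? (· == '#') with
      | none => simp
      | some f =>
        simp only [Option.map_some, Prod.mk.injEq, and_true, true_and]
        push_cast; ring

-- ['#'] is a prefix of l.drop i exactly when l[i]? = some '#'.
lemma hash_prefix_drop (l : List Char) (i : Nat) :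
    ['#'] <+: l.drop i ↔ l[i]? = some '#' := by
  rw [← List.head?_drop]
  cases hd : l.drop i with
  | nil => simp
  | cons x xs =>
    constructor
    · rintro ⟨t, ht⟩
      simp only [List.cons_append, List.nil_append, List.cons.injEq] at ht
      simp [← ht.1]
    · intro hx; simp at hx; exact ⟨xs, by simp [hx]⟩

-- Python's line.find('#') is the first index of '#', or -1.
lemma find_hash_eq (l : List Char) :
    PySem.Chars.find l ['#'] =
      match l.findIdx? (· == '#') with
      | none => -1
      | some f => (f : Int) := by
  cases hf : l.findIdx? (· == '#') with
  | none =>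
    rw [List.findIdx?_eq_none_iff] at hf
    rw [(PySem.Chars.find_eq_neg_one_iff l ['#']).2]
    intro hinf
    have : '#' ∈ l := hinf.subset (by simp)
    have := hf '#' this; simp at this
  | some f =>
    rw [List.findIdx?_eq_some_iff_getElem] at hf
    obtain ⟨hflt, hpf, hmin⟩ := hf
    simp only [beq_iff_eq] at hpf hmin
    have hpre : ['#'] <+: l.drop f := (hash_prefix_drop l f).2 (by simp [hflt, hpf])
    have hnn : 0 ≤ PySem.Chars.find l ['#'] := by
      rw [PySem.Chars.find_nonneg_iff]
      exact ⟨l.take f, l.drop (f + 1), by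
        have := List.getElem_cons_drop (as := l) (i := f) hflt
        rw [hpf] at this
        simp [this]⟩
    obtain ⟨hpreF, hminF⟩ := PySem.Chars.find_spec hnn
    set F := (PySem.Chars.find l ['#']).toNat with hF
    have hFle : F ≤ f := by
      by_contra hgt
      exact hminF f (by omega) hpre
    have hFlt : F < l.length := by omega
    have hFhash : l[F] = '#' := by
      have := (hash_prefix_drop l F).1 hpreF
      simpa [List.getElem?_eq_getElem hFlt] using this
    have hfF : F = f := by
      by_contra hne
      exact hmin F (by omega) hFhash
    simp only []
    omega

-- First-newline decomposition.
lemma exists_line_split (cs : List Char) (h : '\n' ∈ cs) :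
    ∃ l rest, cs = l ++ '\n' :: rest ∧ '\n' ∉ l := by
  induction cs with
  | nil => simp at h
  | cons c cs ih =>
    by_cases hc : c = '\n'
    · exact ⟨[], cs, by simp [hc], by simp⟩
    · rcases List.mem_cons.1 h with h1 | h2
      · exact absurd h1.symm hc
      obtain ⟨l, rest, heq, hnl⟩ := ih h2
      refine ⟨c :: l, rest, by simp [heq], ?_⟩
      simp only [List.mem_cons, not_or]
      exact ⟨fun e => hc e.symm, hnl⟩

-- Main invariant: A's fold over the characters from offset n equals B's fold over the
-- remaining terminated lines with offset n, for any starting accumulator.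
lemma main_inv (k : Nat) : ∀ (cs : List Char), cs.count '\n' = k → ∀ (n : Nat) (acc : List (List Int)),
    ((PySem.List.enumerate cs (n : Int)).foldl findCommentsStep (acc, false, -1, -1)).1 =
      ((cs.splitOn '\n').dropLast.foldl findCommentsAltStep (acc, (n : Int))).1 := by
  induction k with
  | zero =>
    intro cs hk n acc
    have hnl : '\n' ∉ cs := List.count_eq_zero.1 hk
    have hsplit : cs.splitOn '\n' = [cs] :=
      List.splitOnP_eq_single _ cs (fun x hx => by simp; rintro rfl; exact hnl hx)
    rw [hsplit, foldA_line cs hnl n acc]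
    cases cs.findIdx? (· == '#') <;> simp
  | succ k ih =>
    intro cs hk n acc
    have hmem : '\n' ∈ cs := by
      by_contra hn
      rw [List.count_eq_zero.2 hn] at hk; omega
    obtain ⟨l, rest, rfl, hnl⟩ := exists_line_split _ hmem
    have hkrest : rest.count '\n' = k := by
      rw [List.count_append, List.count_cons] at hk
      rw [List.count_eq_zero.2 hnl] at hk
      simp at hk; omega
    -- split A's fold at the newline
    rw [PySem.List.enumerate_append, PySem.List.enumerate_cons, List.foldl_append,
        foldA_line l hnl n acc, List.foldl_cons]
    -- split B's fold at the first line
    have hsplit : (l ++ '\n' :: rest).splitOn '\n' = l :: rest.splitOn '\n' :=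
      List.splitOnP_first _ l (fun x hx => by simp; rintro rfl; exact hnl hx) '\n' (by simp) rest
    rw [hsplit, List.dropLast_cons_of_ne_nil (show List.splitOn '\n' rest ≠ [] from List.splitOnP_ne_nil _ rest), List.foldl_cons]
    have hBstep : findCommentsAltStep (acc, (n : Int)) l =
        ((match l.findIdx? (· == '#') with
          | none => acc
          | some f => acc ++ [[(n : Int) + (f : Int), (n : Int) + (l.length : Int)]]),
         (n : Int) + (l.length : Int) + 1) := by
      simp only [findCommentsAltStep, find_hash_eq l]
      cases hfi : l.findIdx? (· == '#') with
      | none => simp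
      | some f => simp
    rw [hBstep]
    have hcast : ((n : Int) + (l.length : Int) + 1) = (((n + l.length + 1 : Nat)) : Int) := by push_cast; ring
    cases hfi : l.findIdx? (· == '#') with
    | none =>
      have hstep : findCommentsStep (acc, false, -1, -1) ((n : Int) + (l.length : Int), '\n') =
          (acc, false, -1, -1) := by
        simp [findCommentsStep]
      simp only [hstep, hcast]
      exact ih rest hkrest (n + l.length + 1) acc
    | some f =>
      have hstep : findCommentsStep (acc, true, (n : Int) + (f : Int), -1)
            ((n : Int) + (l.length : Int), '\n') =
          (acc ++ [[(n : Int) + (f : Int), (n : Int) + (l.length : Int)]], false, -1, -1) := by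
        simp [findCommentsStep]
        constructor <;> omega
      simp only [hstep, hcast]
      exact ih rest hkrest (n + l.length + 1) _

-- ===== VERDICT (by name: the statement is the Claim_ definition above) =====
theorem findComments_spec : Claim_equal_findComments := by
  intro s _
  unfold Spec_findComments findComments findComments_alt
  have := main_inv (s.toList.count '\n') s.toList rfl 0 []
  simpa using this
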